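-- pv_equiv track=rewrite | github.com/dfalbel/raghilda | src/ragnar/_chunker.py | _snap_nearest
-- ===== SOURCE A (Python) =====
-- from typing import Optional, Callable, Any, Union, Sequence, List
-- import bisect
--
-- def _snap_nearest(
--     x: List[int], candidates: List[int], max_dist: Optional[int]
-- ) -> List[Optional[int]]:
--     if not candidates:
--         return [None] * len(x)
--     candidates = sorted(set(candidates))
--     out: List[Optional[int]] = []
--     for xi in x:
--         idx = bisect.bisect_left(candidates, xi)
--         if idx == 0:
--             pick = candidates[0]
--         elif idx == len(candidates):
--             pick = candidates[-1]
--         else: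
--             left = candidates[idx - 1]
--             right = candidates[idx]
--             pick = left if abs(xi - left) <= abs(xi - right) else right
--         if max_dist is not None and abs(pick - xi) > max_dist:
--             out.append(None)
--         else:
--             out.append(pick)
--     return out
-- ===== SOURCE B (Python) =====
-- from typing import Optional, List
--
--
-- def _snap_nearest(
--     x: List[int], candidates: List[int], max_dist: Optional[int]
-- ) -> List[Optional[int]]:
--     # Same snapping, but the nearest candidate is found by a direct linear
--     # min-by-distance scan over the sorted deduplicated candidates (min over
--     # the ascending list breaks ties toward the smaller candidate, exactly
--     # like A's `<=` picking `left`), instead of bisect + index arithmetic.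
--     if not candidates:
--         return [None for _ in x]
--     cs = sorted(set(candidates))
--
--     def choose(xi: int) -> Optional[int]:
--         pick = min(cs, key=lambda c: abs(c - xi))
--         if max_dist is not None and abs(pick - xi) > max_dist:
--             return None
--         return pick
--
--     return [choose(xi) for xi in x]
-- ===== Notes on version B (the rewrite author's own statement) =====
-- stated objective: simpler
-- what changed: Replaces bisect binary search plus left/right index arithmetic by a direct min-by-absolute-distance scan over the sorted deduplicated candidates (ties fall to the smaller candidate automatically), and builds the output with a comprehension instead of an append loop.
import Mathlib
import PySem

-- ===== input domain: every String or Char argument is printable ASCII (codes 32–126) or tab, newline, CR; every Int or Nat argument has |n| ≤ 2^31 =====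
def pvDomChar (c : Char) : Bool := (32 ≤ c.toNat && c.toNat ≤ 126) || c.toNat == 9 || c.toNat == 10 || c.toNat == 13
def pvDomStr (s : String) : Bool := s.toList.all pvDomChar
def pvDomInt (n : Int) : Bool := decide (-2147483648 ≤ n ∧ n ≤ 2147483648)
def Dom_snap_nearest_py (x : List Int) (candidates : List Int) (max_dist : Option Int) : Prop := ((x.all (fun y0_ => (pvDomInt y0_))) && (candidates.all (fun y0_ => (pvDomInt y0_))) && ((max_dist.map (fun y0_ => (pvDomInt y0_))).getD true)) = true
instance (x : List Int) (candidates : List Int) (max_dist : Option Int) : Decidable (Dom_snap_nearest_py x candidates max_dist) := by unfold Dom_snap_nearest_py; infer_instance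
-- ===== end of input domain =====

-- B replaces A's bisect-plus-index-arithmetic nearest search with a direct
-- min-by-absolute-distance scan of the sorted deduplicated candidates (simpler, not faster).

-- ===== PORT A =====
-- the loop body's pick for one xi: bisect_left then left/right comparison (verbatim);
-- c is nonempty at every call site, so candidates[0] / candidates[-1] are in range (getD defaults are never used)
def snapPickA (c : List Int) (xi : Int) : Int :=
  if PySem.List.bisectLeft c xi = 0 then c.getD 0 0
  else if PySem.List.bisectLeft c xi = c.length then c.getD (c.length - 1) 0
  else if |xi - c.getD (PySem.List.bisectLeft c xi - 1) 0| ≤ |xi - c.getD (PySem.List.bisectLeft c xi) 0|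
    then c.getD (PySem.List.bisectLeft c xi - 1) 0
    else c.getD (PySem.List.bisectLeft c xi) 0

def snap_nearest_py (x : List Int) (candidates : List Int) (max_dist : Option Int) : List (Option Int) :=
  if candidates = [] then List.replicate x.length none
  else
    let c := PySem.List.sorted (PySem.Set.ofList candidates) (fun v => v)
    x.foldl (fun out xi =>
      let pick := snapPickA c xi
      let v : Option Int :=
        match max_dist with
        | some md => if md < |pick - xi| then none else some pick
        | none => some pick
      out ++ [v]) []

-- ===== PORT B =====
def snap_nearest_py_alt (x : List Int) (candidates : List Int) (max_dist : Option Int) : List (Option Int) :=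
  if candidates = [] then x.map (fun _ => none)
  else
    let c := PySem.List.sorted (PySem.Set.ofList candidates) (fun v => v)
    x.map (fun xi =>
      match PySem.List.min? c (fun v => |v - xi|) with
      | none => none
      | some pick =>
        match max_dist with
        | some md => if md < |pick - xi| then none else some pick
        | none => some pick)

-- ===== PRECONDITION & SPEC =====
def Spec_snap_nearest_py (x : List Int) (candidates : List Int) (max_dist : Option Int) (out : List (Option Int)) : Prop := out = snap_nearest_py_alt x candidates max_dist
instance (x : List Int) (candidates : List Int) (max_dist : Option Int) (out : List (Option Int)) : Decidable (Spec_snap_nearest_py x candidates max_dist out) := by unfold Spec_snap_nearest_py; infer_instance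

-- ===== CLAIM (what is proved, stated in full; the proofs are below) =====
def Claim_equal_snap_nearest_py : Prop := ∀ (x : List Int) (candidates : List Int) (max_dist : Option Int), Dom_snap_nearest_py x candidates max_dist → Spec_snap_nearest_py x candidates max_dist (snap_nearest_py x candidates max_dist)

-- ===== LEMMAS AND PROOFS =====

-- the nearest-candidate characterisation both picks satisfy: a minimiser of |· - xi|
-- that is ≤ every other minimiser
def snapGood (cs : List Int) (xi p : Int) : Prop :=
  p ∈ cs ∧ ∀ y ∈ cs, |p - xi| < |y - xi| ∨ (|p - xi| = |y - xi| ∧ p ≤ y)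

theorem snapGood_unique {cs : List Int} {xi p q : Int}
    (hp : snapGood cs xi p) (hq : snapGood cs xi q) : p = q := by
  have h1 := hp.2 q hq.1
  have h2 := hq.2 p hp.1
  simp only [Int.abs_eq_natAbs] at h1 h2
  omega

-- min over a two-element head absorbs into one: the fold's accumulator step
theorem min?_cons_cons (key : Int → Int) (h b : Int) (t : List Int) :
    PySem.List.min? (h :: b :: t) key
      = PySem.List.min? ((if key b < key h then b else h) :: t) key := by
  by_cases hbh : key b < key h <;> simp [PySem.List.min?, hbh]

theorem min?_cons (key : Int → Int) : ∀ (t : List Int) (h : Int),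
    PySem.List.min? (h :: t) key
    = some (match PySem.List.min? t key with
      | none => h
      | some m => if key m < key h then m else h) := by
  intro t
  induction t with
  | nil => intro h; simp [PySem.List.min?]
  | cons b t' ih =>
    intro h
    rw [min?_cons_cons, ih, ih b]
    rcases hm' : PySem.List.min? t' key with _ | m'
    · simp only []
    · simp only []
      split_ifs <;> first | rfl | omega

-- B's pick satisfies the characterisation on a strictly increasing candidate list
theorem min?_good (xi : Int) : ∀ (cs : List Int), List.Pairwise (· < ·) cs →
    ∀ m, PySem.List.min? cs (fun v => |v - xi|) = some m → snapGood cs xi m := by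
  intro cs
  induction cs with
  | nil => intro _ m hm; simp [PySem.List.min?] at hm
  | cons h t ih =>
    intro hc m hm
    obtain ⟨hhead, htail⟩ := List.pairwise_cons.mp hc
    rw [min?_cons] at hm
    rcases ht : PySem.List.min? t (fun v => |v - xi|) with _ | m'
    · rw [ht] at hm
      simp only [Option.some.injEq] at hm
      subst hm
      have ht' : t = [] := (PySem.List.min?_eq_none_iff t _).mp ht
      subst ht'
      exact ⟨List.mem_singleton.mpr rfl, by
        intro y hy
        rw [List.mem_singleton.mp hy]
        exact Or.inr ⟨rfl, le_rfl⟩⟩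
    · rw [ht] at hm
      simp only [Option.some.injEq] at hm
      have hg := ih htail m' ht
      split_ifs at hm with hcmp
      · subst hm
        refine ⟨List.mem_cons_of_mem _ hg.1, ?_⟩
        intro y hy
        rcases List.mem_cons.mp hy with rfl | hyt
        · exact Or.inl hcmp
        · exact hg.2 y hyt
      · subst hm
        refine ⟨List.mem_cons_self, ?_⟩
        intro y hy
        rcases List.mem_cons.mp hy with rfl | hyt
        · exact Or.inr ⟨rfl, le_rfl⟩
        · have h1 := hg.2 y hyt
          have h2 := hhead y hyt
          simp only [Int.abs_eq_natAbs] at h1 hcmp ⊢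
          omega

-- A's pick satisfies the characterisation
theorem pickA_good (cs : List Int) (xi : Int) (hne : cs ≠ [])
    (hc : List.Pairwise (· < ·) cs) : snapGood cs xi (snapPickA cs xi) := by
  have hle : List.Pairwise (· ≤ ·) cs := hc.imp le_of_lt
  obtain ⟨hidxle, hlt, hge⟩ := PySem.List.bisectLeft_spec cs xi hle
  have hmono := List.pairwise_iff_getElem.mp hc
  have hn : 0 < cs.length := List.length_pos_iff.mpr hne
  unfold snapPickA
  split_ifs with h0 hN hcmp
  · -- idx = 0: pick is candidates[0]
    rw [List.getD_eq_getElem cs 0 hn]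
    refine ⟨List.getElem_mem hn, ?_⟩
    intro y hy
    obtain ⟨j, hj, rfl⟩ := List.mem_iff_getElem.mp hy
    have hx0 : xi ≤ cs[0]'hn := hge 0 hn (by omega)
    have hxj : xi ≤ cs[j]'hj := hge j hj (by omega)
    have hcj : cs[0]'hn ≤ cs[j]'hj := by
      rcases Nat.eq_zero_or_pos j with rfl | hjpos
      · exact le_rfl
      · exact le_of_lt (hmono 0 j hn hj hjpos)
    simp only [Int.abs_eq_natAbs]
    omega
  · -- idx = len: pick is candidates[-1]
    have hn1 : cs.length - 1 < cs.length := by omega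
    rw [List.getD_eq_getElem cs 0 hn1]
    refine ⟨List.getElem_mem hn1, ?_⟩
    intro y hy
    obtain ⟨j, hj, rfl⟩ := List.mem_iff_getElem.mp hy
    have hx1 : cs[cs.length - 1]'hn1 < xi := hlt _ hn1 (by omega)
    have hxj : cs[j]'hj < xi := hlt j hj (by omega)
    have hcj : cs[j]'hj ≤ cs[cs.length - 1]'hn1 := by
      rcases Nat.lt_or_ge j (cs.length - 1) with hlt' | hge'
      · exact le_of_lt (hmono j _ hj hn1 hlt')
      · have hje : j = cs.length - 1 := by omega
        subst hje; exact le_rfl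
    simp only [Int.abs_eq_natAbs]
    omega
  all_goals {
    -- middle: left = cs[idx-1] < xi ≤ right = cs[idx]
    have hi1 : PySem.List.bisectLeft cs xi - 1 < cs.length := by omega
    have hi2 : PySem.List.bisectLeft cs xi < cs.length := by omega
    simp only [List.getD_eq_getElem cs 0 hi1, List.getD_eq_getElem cs 0 hi2] at hcmp ⊢
    have hL : cs[PySem.List.bisectLeft cs xi - 1]'hi1 < xi := hlt _ hi1 (by omega)
    have hR : xi ≤ cs[PySem.List.bisectLeft cs xi]'hi2 := hge _ hi2 le_rfl
    first
      | refine ⟨List.getElem_mem hi1, ?_⟩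
      | refine ⟨List.getElem_mem hi2, ?_⟩
    intro y hy
    obtain ⟨j, hj, rfl⟩ := List.mem_iff_getElem.mp hy
    have hb : cs[j]'hj ≤ cs[PySem.List.bisectLeft cs xi - 1]'hi1 ∨
        cs[PySem.List.bisectLeft cs xi]'hi2 ≤ cs[j]'hj := by
      rcases Nat.lt_or_ge j (PySem.List.bisectLeft cs xi) with hj1 | hj2
      · left
        rcases Nat.lt_or_ge j (PySem.List.bisectLeft cs xi - 1) with h' | h'
        · exact le_of_lt (hmono j _ hj hi1 h')
        · have hje : j = PySem.List.bisectLeft cs xi - 1 := by omega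
          subst hje; exact le_rfl
      · right
        rcases Nat.lt_or_ge (PySem.List.bisectLeft cs xi) j with h' | h'
        · exact le_of_lt (hmono _ j hi2 hj h')
        · have hje : j = PySem.List.bisectLeft cs xi := by omega
          subst hje; exact le_rfl
    simp only [Int.abs_eq_natAbs] at hcmp ⊢
    omega }

theorem pick_eq (cs : List Int) (xi : Int) (hne : cs ≠ [])
    (hc : List.Pairwise (· < ·) cs) :
    PySem.List.min? cs (fun v => |v - xi|) = some (snapPickA cs xi) := by
  rcases hm : PySem.List.min? cs (fun v => |v - xi|) with _ | m
  · exact absurd ((PySem.List.min?_eq_none_iff cs _).mp hm) hne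
  · rw [snapGood_unique (min?_good xi cs hc m hm) (pickA_good cs xi hne hc)]

-- ===== VERDICT (by name: the statement is the Claim_ definition above) =====
theorem snap_nearest_py_spec : Claim_equal_snap_nearest_py := by
  intro x candidates md _
  unfold Spec_snap_nearest_py snap_nearest_py snap_nearest_py_alt
  by_cases hc0 : candidates = []
  · simp [hc0, List.map_const']
  · simp only [if_neg hc0]
    set cs := PySem.List.sorted (PySem.Set.ofList candidates) (fun v => v) with hcdef
    have hc : List.Pairwise (· < ·) cs := PySem.List.sorted_ofList_pairwise_lt candidates
    have hne : cs ≠ [] := by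
      intro hnil
      have := (PySem.List.sorted_eq_nil_iff (PySem.Set.ofList candidates) (fun v => v) false).mp hnil
      obtain ⟨a, t, rfl⟩ := List.exists_cons_of_ne_nil hc0
      have ha : a ∈ PySem.Set.ofList (a :: t) :=
        (PySem.Set.mem_ofList (a :: t) a).mpr (List.mem_cons_self)
      rw [this] at ha
      exact List.not_mem_nil ha
    rw [PySem.List.foldl_append_singleton_eq_map
      (fun xi => (match md with
        | some m => if m < |snapPickA cs xi - xi| then none else some (snapPickA cs xi)
        | none => some (snapPickA cs xi) : Option Int)) x []]
    simp only [List.nil_append]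
    refine List.map_congr_left ?_
    intro xi _
    rw [pick_eq cs xi hne hc]
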